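-- pv_equiv track=rewrite | github.com/nkmashaev/Courses | homework7/task03.py | check
-- ===== SOURCE A (Python) =====
-- from typing import List
--
-- def check(board: List[List], i: int, j: int, si: int, sj: int, fuel: int) -> bool:
--     if not fuel:
--         return True
--     new_i = i + si
--     new_j = j + sj
--     if not (0 <= new_i < len(board)):
--         return False
--     if not (0 <= new_j < len(board[i])):
--         return False
--     if board[i][j] == board[new_i][new_j]:
--         return check(board, i + si, j + sj, si, sj, fuel - 1)
--     else:
--         return False
-- ===== SOURCE B (Python) =====
-- from typing import List
--
--
-- def check(board: List[List], i: int, j: int, si: int, sj: int, fuel: int) -> bool: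
--     return all(
--         0 <= i + k * si < len(board)
--         and 0 <= j + k * sj < len(board[i + k * si])
--         and board[i + k * si][j + k * sj] == board[i][j]
--         for k in range(1, fuel + 1)
--     )
-- ===== Notes on version B (the rewrite author's own statement) =====
-- stated objective: idiomatic
-- what changed: Replaces the moving-cursor tail recursion by a single all() over closed-form ray positions i+k*si, j+k*sj, bounding each column by the length of the row actually being indexed and comparing every cell to the fixed starting cell; Pre_ excludes negative fuel (A recurses unboundedly) and, once the walk engages, ragged boards and out-of-wraparound start indices, on which A can raise IndexError and which row bounds a column is anybody's choice.
-- outside the precondition, e.g. on check([[1], [1, 1]], 0, 0, 1, 1, 1): A returns False, B returns True; on check([[1, 1], [1]], 0, 1, 1, 0, 1): A raises IndexError, B returns False; on check([[1]], 0, 0, 1, 0, -1): A returns False, B returns True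
import Mathlib
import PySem

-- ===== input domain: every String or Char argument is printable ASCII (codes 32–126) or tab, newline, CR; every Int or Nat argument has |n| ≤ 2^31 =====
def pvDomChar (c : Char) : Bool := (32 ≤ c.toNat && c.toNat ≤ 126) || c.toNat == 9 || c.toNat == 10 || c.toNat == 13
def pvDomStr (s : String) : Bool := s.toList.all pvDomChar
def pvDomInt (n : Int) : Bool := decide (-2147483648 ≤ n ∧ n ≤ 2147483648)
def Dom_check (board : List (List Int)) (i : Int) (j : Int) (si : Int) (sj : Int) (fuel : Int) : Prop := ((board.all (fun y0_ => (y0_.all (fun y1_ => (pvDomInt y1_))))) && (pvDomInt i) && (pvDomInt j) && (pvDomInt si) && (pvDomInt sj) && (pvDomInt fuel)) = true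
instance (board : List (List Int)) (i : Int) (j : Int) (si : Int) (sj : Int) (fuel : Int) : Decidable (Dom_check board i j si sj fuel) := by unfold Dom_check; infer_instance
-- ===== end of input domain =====

-- B replaces A's moving-cursor tail recursion by one all() over closed-form ray positions,
-- bounding each column by the row actually indexed and comparing to the fixed start cell
-- (idiomatic; same cost).

-- board[x][y] with Python indexing (negative wraparound; 0 on the raising inputs, which Pre_ excludes)
def cellOf (board : List (List Int)) (x : Int) (y : Int) : Int :=
  PySem.List.pyGetD ((PySem.List.pyGet? board x).getD []) y 0

-- len(board[x]) as an Int (0 on out-of-wrap x, which Pre_ excludes before it matters)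
def rowLen (board : List (List Int)) (x : Int) : Int :=
  (((PySem.List.pyGet? board x).getD []).length : Int)

-- ===== PORT A =====
-- Python's fuel-counted recursion, the Int fuel measured by fuel.toNat (Pre_ keeps fuel ≥ 0)
def checkGo (board : List (List Int)) (si : Int) (sj : Int) : Nat → Int → Int → Bool
  | 0, _, _ => true
  | Nat.succ n, i, j =>
    let new_i := i + si
    let new_j := j + sj
    if ¬(0 ≤ new_i ∧ new_i < (board.length : Int)) then false
    else if ¬(0 ≤ new_j ∧ new_j < rowLen board i) then false
    else if cellOf board i j == cellOf board new_i new_j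
      then checkGo board si sj n new_i new_j
      else false

-- totalization of A's recursion: with fuel < 0 Python A never returns True (it walks until
-- it returns False or raises; Pre_ excludes fuel < 0), so the port answers false there
def check (board : List (List Int)) (i : Int) (j : Int) (si : Int) (sj : Int) (fuel : Int) : Bool :=
  if fuel < 0 then false else checkGo board si sj fuel.toNat i j

-- ===== PORT B =====
-- the generator term of Source B's all(...) at offset k
def bstep (board : List (List Int)) (i : Int) (j : Int) (si : Int) (sj : Int) (k : Int) : Bool :=
  decide (0 ≤ i + k * si) && decide (i + k * si < (board.length : Int)) &&
  (decide (0 ≤ j + k * sj) && decide (j + k * sj < rowLen board (i + k * si))) &&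
  (cellOf board (i + k * si) (j + k * sj) == cellOf board i j)

def check_alt (board : List (List Int)) (i : Int) (j : Int) (si : Int) (sj : Int) (fuel : Int) : Bool :=
  (PySem.List.pyRange 1 (fuel + 1) 1).all (bstep board i j si sj)

-- ===== PRECONDITION & SPEC =====
-- Pre_ excludes negative fuel (A recurses without bound, never returning True) and, whenever
-- the walk engages beyond its first row check, ragged boards and out-of-wraparound start
-- indices: there A can raise IndexError, and on a ragged board which row's length bounds a
-- column is anybody's choice (A takes the pre-move row, B the row actually indexed).
def Pre_check (board : List (List Int)) (i : Int) (j : Int) (si : Int) (sj : Int) (fuel : Int) : Prop :=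
  0 ≤ fuel ∧
    (fuel = 0 ∨
     ¬(0 ≤ i + si ∧ i + si < (board.length : Int)) ∨
     ((∀ r ∈ board, ∀ r' ∈ board, r.length = r'.length) ∧
      (-(board.length : Int) ≤ i ∧ i < (board.length : Int)) ∧
      (¬(0 ≤ j + sj ∧ j + sj < rowLen board i) ∨
       (-(rowLen board i) ≤ j ∧ j < rowLen board i))))

instance (board : List (List Int)) (i : Int) (j : Int) (si : Int) (sj : Int) (fuel : Int) : Decidable (Pre_check board i j si sj fuel) := by unfold Pre_check; infer_instance

def pvWitness_check : List (List Int) × Int × Int × Int × Int × Int := ([[1, 1], [1, 1]], 0, 0, 0, 1, 1)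

def Spec_check (board : List (List Int)) (i : Int) (j : Int) (si : Int) (sj : Int) (fuel : Int) (out : Bool) : Prop := out = check_alt board i j si sj fuel
instance (board : List (List Int)) (i : Int) (j : Int) (si : Int) (sj : Int) (fuel : Int) (out : Bool) : Decidable (Spec_check board i j si sj fuel out) := by unfold Spec_check; infer_instance

-- ===== CLAIM (what is proved, stated in full; the proofs are below) =====
def Claim_equal_check : Prop := ∀ (board : List (List Int)) (i : Int) (j : Int) (si : Int) (sj : Int) (fuel : Int), Dom_check board i j si sj fuel → Pre_check board i j si sj fuel → Spec_check board i j si sj fuel (check board i j si sj fuel)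

-- ===== LEMMAS AND PROOFS =====

-- on a board whose rows all share one length, any two wrapped-in-range rows have equal length
theorem rowLen_congr (board : List (List Int)) (a b : Int)
    (hrect : ∀ r ∈ board, ∀ r' ∈ board, r.length = r'.length)
    (ha : -(board.length : Int) ≤ a ∧ a < (board.length : Int))
    (hb : -(board.length : Int) ≤ b ∧ b < (board.length : Int)) :
    rowLen board a = rowLen board b := by
  obtain ⟨ra, hra⟩ : ∃ r, PySem.List.pyGet? board a = some r := by
    cases h : PySem.List.pyGet? board a with
    | none =>
      exfalso
      have h2 := (PySem.List.pyGet?_eq_none_iff board a).mp h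
      exact h2 ⟨ha.1, ha.2⟩
    | some r => exact ⟨r, rfl⟩
  obtain ⟨rb, hrb⟩ : ∃ r, PySem.List.pyGet? board b = some r := by
    cases h : PySem.List.pyGet? board b with
    | none =>
      exfalso
      have h2 := (PySem.List.pyGet?_eq_none_iff board b).mp h
      exact h2 ⟨hb.1, hb.2⟩
    | some r => exact ⟨r, rfl⟩
  have hma : ra ∈ board := PySem.List.mem_of_pyGet?_eq_some _ hra
  have hmb : rb ∈ board := PySem.List.mem_of_pyGet?_eq_some _ hrb
  unfold rowLen
  rw [hra, hrb]
  simp only [Option.getD_some]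
  exact_mod_cast hrect ra hma rb hmb

-- shifting the base of a B-step one stride forward, given that the first compared value agrees
theorem bstep_shift (board : List (List Int)) (i j si sj : Int) (m : Int)
    (hv : cellOf board (i + si) (j + sj) = cellOf board i j) :
    bstep board i j si sj (m + 2) = bstep board (i + si) (j + sj) si sj (m + 1) := by
  unfold bstep
  have h1 : i + (m + 2) * si = (i + si) + (m + 1) * si := by ring
  have h2 : j + (m + 2) * sj = (j + sj) + (m + 1) * sj := by ring
  rw [h1, h2, hv]

-- A's walk equals B's conjunction of per-offset steps, on a rectangular board from a
-- wrapped-in-range row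
theorem go_eq_all (board : List (List Int)) (si sj : Int)
    (hrect : ∀ r ∈ board, ∀ r' ∈ board, r.length = r'.length) :
    ∀ (n : Nat) (i j : Int),
      (-(board.length : Int) ≤ i ∧ i < (board.length : Int)) →
      checkGo board si sj n i j
        = (List.range n).all (fun m => bstep board i j si sj ((m : Int) + 1)) := by
  intro n
  induction n with
  | zero => intro i j _; simp [checkGo]
  | succ n ih =>
    intro i j hi
    rw [List.range_succ_eq_map]
    simp only [List.all_cons, List.all_map]
    have hstep1 : bstep board i j si sj (((0 : Nat) : Int) + 1)
        = (decide (0 ≤ i + si) && decide (i + si < (board.length : Int)) &&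
           (decide (0 ≤ j + sj) && decide (j + sj < rowLen board (i + si))) &&
           (cellOf board (i + si) (j + sj) == cellOf board i j)) := by
      unfold bstep; norm_num
    show checkGo board si sj (n + 1) i j = _
    unfold checkGo
    by_cases hb1 : 0 ≤ i + si ∧ i + si < (board.length : Int)
    · have hlen : rowLen board (i + si) = rowLen board i :=
        rowLen_congr board (i + si) i hrect ⟨by omega, hb1.2⟩ hi
      by_cases hb2 : 0 ≤ j + sj ∧ j + sj < rowLen board i
      · by_cases hv : cellOf board i j = cellOf board (i + si) (j + sj)
        · -- step 1 succeeds: both sides keep the head and continue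
          have hbeq : (cellOf board i j == cellOf board (i + si) (j + sj)) = true := by
            simp [hv]
          have hhead : bstep board i j si sj (((0 : Nat) : Int) + 1) = true := by
            rw [hstep1, hlen]
            simp [hb1.1, hb1.2, hb2.1, hb2.2, hv.symm]
          rw [if_neg (not_not_intro hb1), if_neg (not_not_intro hb2), if_pos hbeq,
            ih (i + si) (j + sj) ⟨by omega, hb1.2⟩, hhead, Bool.true_and]
          congr 1
          funext m
          rw [Function.comp_apply]
          have hm : ((m + 1 : Nat) : Int) + 1 = (m : Int) + 2 := by push_cast; ring
          rw [hm, bstep_shift board i j si sj (m : Int) hv.symm]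
        · -- values differ: both sides false
          have hbeq : (cellOf board i j == cellOf board (i + si) (j + sj)) = false := by
            simp [hv]
          have hhead : bstep board i j si sj (((0 : Nat) : Int) + 1) = false := by
            rw [hstep1]
            have hf : (cellOf board (i + si) (j + sj) == cellOf board i j) = false := by
              simp; intro h; exact hv h.symm
            simp [hf]
          rw [if_neg (not_not_intro hb1), if_neg (not_not_intro hb2), if_neg (by simp [hbeq]),
            hhead]
          simp
      · -- column bound fails: both sides false
        have hhead : bstep board i j si sj (((0 : Nat) : Int) + 1) = false := by
          rw [hstep1, hlen]
          rcases (not_and_or.mp hb2) with h | h <;> simp [h]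
        rw [if_neg (not_not_intro hb1), if_pos hb2, hhead]
        simp
    · -- row bound fails: both sides false
      have hhead : bstep board i j si sj (((0 : Nat) : Int) + 1) = false := by
        rw [hstep1]
        rcases (not_and_or.mp hb1) with h | h <;> simp [h]
      rw [if_pos hb1, hhead]
      simp

-- the two ports agree on every input satisfying Pre_
theorem check_eq_check_alt (board : List (List Int)) (i j si sj fuel : Int)
    (hpre : Pre_check board i j si sj fuel) :
    check board i j si sj fuel = check_alt board i j si sj fuel := by
  obtain ⟨hf, hcase⟩ := hpre
  unfold check check_alt
  rw [if_neg (by omega)]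
  rcases hcase with h0 | hrow | ⟨hrect, hi, _⟩
  · -- fuel = 0: no step is taken on either side
    subst h0
    rw [PySem.List.pyRange_one_eq_nil (by norm_num)]
    simp [checkGo]
  · -- the very first row check fails: both sides false
    by_cases h0 : fuel = 0
    · subst h0
      rw [PySem.List.pyRange_one_eq_nil (by norm_num)]
      simp [checkGo]
    · obtain ⟨n, hn⟩ : ∃ n, fuel.toNat = n + 1 := ⟨fuel.toNat - 1, by omega⟩
      rw [hn]
      show checkGo board si sj (n + 1) i j = _
      unfold checkGo
      rw [if_pos hrow, PySem.List.pyRange_one_cons (by omega), List.all_cons]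
      have hone : i + 1 * si = i + si := by ring
      have hhead : bstep board i j si sj 1 = false := by
        unfold bstep
        rw [hone]
        rcases (not_and_or.mp hrow) with h | h <;> simp [h]
      rw [hhead]
      simp
  · -- rectangular board, wrapped-in-range start row: full step-by-step agreement
    rw [PySem.List.pyRange_one 1 (fuel + 1)]
    have h : (fuel + 1 - 1) = fuel := by ring
    rw [h, List.all_map, go_eq_all board si sj hrect fuel.toNat i j hi]
    congr 1
    funext m
    have hm : (1 : Int) + (m : Int) = (m : Int) + 1 := by ring
    rw [Function.comp_apply, hm]

-- ===== VERDICT (by name: the statement is the Claim_ definition above) =====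
theorem check_spec : Claim_equal_check := by
  intro board i j si sj fuel _ hpre
  unfold Spec_check
  exact check_eq_check_alt board i j si sj fuel hpre
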